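-- pv_equiv track=rewrite | github.com/Ciro-Taranto/AoC_2025 | day08/p1.py | solve
-- ===== SOURCE A (Python) =====
-- from heapq import heappop, heappush, nsmallest
-- from itertools import combinations
--
-- Position = tuple[int, int, int]
--
-- def distance(p1: Position, p2: Position) -> int:
--     return sum((a - b) ** 2 for a, b in zip(p1, p2))
--
-- def sort_pairs(boxes: list[Position], max_connections: int = 1000):
--     return nsmallest(
--         max_connections,
--         [(distance(p1, p2), (p1, p2)) for p1, p2 in combinations(boxes, 2)],
--     )
--
-- def solve(boxes: list[Position], max_connections: int = 1000) -> list[set[Position]]: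
--     distance_heap = sort_pairs(boxes, max_connections=max_connections)
--     connections: dict[Position, set[Position]] = {b: {b} for b in boxes}
--     for _ in range(max_connections):
--         _, (b1, b2) = heappop(distance_heap)
--         merged_circuit = connections[b1].union(connections[b2])
--         for b in merged_circuit:
--             connections[b] = merged_circuit
--     unique_circuits = set()
--     for _, circuit in connections.items():
--         unique_circuits.add(tuple(sorted(circuit)))
--     return sorted(unique_circuits, key=len, reverse=True)
-- ===== SOURCE B (Python) =====
-- from itertools import combinations
--
--
-- def solve(boxes, max_connections=1000):
--     edges = sorted(
--         (sum((a - c) ** 2 for a, c in zip(p, q)), (p, q))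
--         for p, q in combinations(boxes, 2)
--     )[: max(max_connections, 0)]
--     groups = [{b} for b in dict.fromkeys(boxes)]
--     for _, (b1, b2) in edges:
--         g1 = next(g for g in groups if b1 in g)
--         g2 = next(g for g in groups if b2 in g)
--         groups = [g for g in groups if b1 not in g and b2 not in g] + [g1 | g2]
--     circuits = []
--     seen = set()
--     for b in dict.fromkeys(boxes):
--         if b not in seen:
--             g = next(g for g in groups if b in g)
--             seen |= g
--             circuits.append(tuple(sorted(g)))
--     return sorted(circuits, key=len, reverse=True)
-- ===== Notes on version B (the rewrite author's own statement) =====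
-- stated objective: alternative
-- what changed: A tracks components in a dict mapping every box to its circuit-set and copies each merged set onto all its members; B keeps the partition as a list of disjoint groups, merges two groups per popped pair by filtering them out and appending their union, and reads circuits off with a single first-occurrence scan (no heap: the k nearest pairs are the sorted prefix).
import Mathlib
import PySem

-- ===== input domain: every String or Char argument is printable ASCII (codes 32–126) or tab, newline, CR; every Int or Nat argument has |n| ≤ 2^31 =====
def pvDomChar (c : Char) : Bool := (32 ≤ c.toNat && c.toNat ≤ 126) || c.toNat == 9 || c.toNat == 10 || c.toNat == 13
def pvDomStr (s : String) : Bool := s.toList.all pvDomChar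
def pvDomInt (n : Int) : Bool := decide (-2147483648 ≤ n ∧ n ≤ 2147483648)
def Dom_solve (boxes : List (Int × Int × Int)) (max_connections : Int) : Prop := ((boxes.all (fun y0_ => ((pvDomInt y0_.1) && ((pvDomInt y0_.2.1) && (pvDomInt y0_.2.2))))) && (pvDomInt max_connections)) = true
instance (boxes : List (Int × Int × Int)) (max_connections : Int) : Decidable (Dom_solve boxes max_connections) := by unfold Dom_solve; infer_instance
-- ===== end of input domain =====

-- B replaces A's dict-of-sets component tracking (merged set copied onto every member) by a
-- list-of-disjoint-groups partition merged per edge and read off by a first-occurrence scan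
-- (objective: alternative — same asymptotic cost, a different data structure).
-- NOTE on ordering: Python A's final 'sorted(unique_circuits, key=len, reverse=True)' breaks
-- length ties in the hash-iteration order of a Python set, which is not modelled; the ports fix
-- first-insertion order instead.  The task compares outputs as a SET of circuits, where this is exact.

-- shared key helpers: Python compares tuples lexicographically; 'toLex' realises exactly that order
def posKey (p : Int × Int × Int) : Int ×ₗ (Int ×ₗ Int) :=
  toLex (p.1, toLex (p.2.1, p.2.2))

def edgeKey (e : Int × (Int × Int × Int) × (Int × Int × Int)) :
    Int ×ₗ ((Int ×ₗ (Int ×ₗ Int)) ×ₗ (Int ×ₗ (Int ×ₗ Int))) :=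
  toLex (e.1, toLex (posKey e.2.1, posKey e.2.2))

-- ===== PORT A =====
-- distance(p1, p2): sum((a - b) ** 2 for a, b in zip(p1, p2)) on 3-tuples
def distanceA (p1 p2 : Int × Int × Int) : Int :=
  ((List.zip [p1.1, p1.2.1, p1.2.2] [p2.1, p2.2.1, p2.2.2]).map (fun ab => (ab.1 - ab.2) ^ 2)).sum

-- itertools.combinations(boxes, 2), each 2-combination unpacked as a pair
def pairsOf (boxes : List (Int × Int × Int)) :
    List ((Int × Int × Int) × (Int × Int × Int)) :=
  (PySem.List.combinations boxes 2).filterMap (fun c =>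
    match c with
    | [p, q] => some (p, q)
    | _ => none)

-- sort_pairs: nsmallest(n, it) is documented as sorted(it)[:n] (and [] for n ≤ 0); ties are
-- identical tuples here, so this is exact
def sortPairs (boxes : List (Int × Int × Int)) (max_connections : Int) :
    List (Int × (Int × Int × Int) × (Int × Int × Int)) :=
  (PySem.List.sorted ((pairsOf boxes).map (fun pq => (distanceA pq.1 pq.2, pq))) edgeKey false).take
    (max max_connections 0).toNat

-- solve: the 'for _ in range(max_connections): heappop(...)' loop pops the sorted list in
-- ascending order; under Pre_solve it performs exactly one pop per element of sortPairs,
-- so it is the fold below.  'for b in merged_circuit' iterates a Python set, but only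
-- overwrites existing dict keys, so the result does not depend on that iteration order.
def solve (boxes : List (Int × Int × Int)) (max_connections : Int) : List (List (Int × Int × Int)) :=
  let distance_heap := sortPairs boxes max_connections
  let connections0 : PySem.Dict (Int × Int × Int) (PySem.Set (Int × Int × Int)) :=
    boxes.foldl (fun d b => d.insert b [b]) PySem.Dict.empty
  let connections := distance_heap.foldl (fun d e =>
    let merged := PySem.Set.union (d.getD e.2.1 PySem.Set.empty) (d.getD e.2.2 PySem.Set.empty)
    merged.foldl (fun d' b => d'.insert b merged) d) connections0
  let unique : PySem.Set (List (Int × Int × Int)) :=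
    connections.items.foldl (fun u kv => PySem.Set.add u (PySem.List.sorted kv.2 posKey false))
      PySem.Set.empty
  PySem.List.sorted unique (fun c => c.length) true

-- ===== PORT B =====
-- Source B: same sorted-prefix edge list; then a partition (list of disjoint groups) is merged per
-- edge by filtering out the two touched groups and appending their union; circuits are read off
-- by a first-occurrence scan over dict.fromkeys(boxes) with a 'seen' set.
def solve_alt (boxes : List (Int × Int × Int)) (max_connections : Int) : List (List (Int × Int × Int)) :=
  let edges :=
    (PySem.List.sorted ((pairsOf boxes).map (fun pq => (distanceA pq.1 pq.2, pq))) edgeKey false).take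
      (max max_connections 0).toNat
  let groups0 : List (PySem.Set (Int × Int × Int)) := (PySem.List.dedup boxes).map (fun b => [b])
  let groups := edges.foldl (fun G e =>
    let g1 := (G.find? (fun g => PySem.Set.contains g e.2.1)).getD PySem.Set.empty
    let g2 := (G.find? (fun g => PySem.Set.contains g e.2.2)).getD PySem.Set.empty
    (G.filter (fun g => !PySem.Set.contains g e.2.1 && !PySem.Set.contains g e.2.2))
      ++ [PySem.Set.union g1 g2]) groups0
  let scan := (PySem.List.dedup boxes).foldl
    (fun (st : List (List (Int × Int × Int)) × PySem.Set (Int × Int × Int)) b =>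
      if PySem.Set.contains st.2 b then st
      else
        let g := (groups.find? (fun g => PySem.Set.contains g b)).getD PySem.Set.empty
        (st.1 ++ [PySem.List.sorted g posKey false], PySem.Set.union st.2 g))
    ([], PySem.Set.empty)
  PySem.List.sorted scan.1 (fun c => c.length) true

-- ===== PRECONDITION & SPEC =====
-- A pops the pair heap max_connections times and raises IndexError when fewer than
-- max_connections pairs exist; Pre_ admits exactly the inputs where Python A returns.
def Pre_solve (boxes : List (Int × Int × Int)) (max_connections : Int) : Prop :=
  max_connections ≤ ((boxes.length * (boxes.length - 1) / 2 : Nat) : Int)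
instance (boxes : List (Int × Int × Int)) (max_connections : Int) : Decidable (Pre_solve boxes max_connections) := by unfold Pre_solve; infer_instance

def pvWitness_solve : (List (Int × Int × Int)) × Int := ([(0, 0, 0), (1, 0, 0), (0, 2, 0)], 2)


def Spec_solve (boxes : List (Int × Int × Int)) (max_connections : Int) (out : List (List (Int × Int × Int))) : Prop := out = solve_alt boxes max_connections
instance (boxes : List (Int × Int × Int)) (max_connections : Int) (out : List (List (Int × Int × Int))) : Decidable (Spec_solve boxes max_connections out) := by unfold Spec_solve; infer_instance

-- ===== CLAIM (what is proved, stated in full; the proofs are below) =====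
def Claim_equal_solve : Prop := ∀ (boxes : List (Int × Int × Int)) (max_connections : Int), Dom_solve boxes max_connections → Pre_solve boxes max_connections → Spec_solve boxes max_connections (solve boxes max_connections)


-- ===== LEMMAS AND PROOFS =====

-- abbreviations used only by the proofs
def SKey (g : PySem.Set (Int × Int × Int)) : List (Int × Int × Int) :=
  PySem.List.sorted g posKey false

def grpOf (G : List (PySem.Set (Int × Int × Int))) (b : Int × Int × Int) :
    PySem.Set (Int × Int × Int) :=
  (G.find? (fun g => PySem.Set.contains g b)).getD PySem.Set.empty

-- the coupling invariant between A's dict-of-sets and B's partition list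
def CInv (B0 : List (Int × Int × Int)) (d : PySem.Dict (Int × Int × Int) (PySem.Set (Int × Int × Int)))
    (G : List (PySem.Set (Int × Int × Int))) : Prop :=
  d.keys = B0 ∧
  (∀ g ∈ G, g ≠ []) ∧
  G.flatten.Nodup ∧
  (∀ b : Int × Int × Int, b ∈ G.flatten ↔ b ∈ B0) ∧
  (∀ g ∈ G, ∀ b ∈ g, (d.getD b PySem.Set.empty).Nodup ∧
    ∀ x : Int × Int × Int, x ∈ d.getD b PySem.Set.empty ↔ x ∈ g)

theorem posKey_injective : Function.Injective posKey := by
  intro a b h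
  have h' := toLex.injective h
  have h2 := toLex.injective (congrArg Prod.snd h')
  exact Prod.ext (congrArg Prod.fst h') (Prod.ext (congrArg Prod.fst h2) (congrArg Prod.snd h2))

theorem SKey_congr {g g' : PySem.Set (Int × Int × Int)} (h : g.Perm g') : SKey g = SKey g' :=
  PySem.List.sorted_eq_sorted_of_perm _ _ _ posKey_injective h

theorem mem_of_SKey_eq {g g' : PySem.Set (Int × Int × Int)} (h : SKey g = SKey g') :
    ∀ x, x ∈ g ↔ x ∈ g' := by
  intro x
  have h1 := PySem.List.sorted_perm g posKey false
  have h2 := PySem.List.sorted_perm g' posKey false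
  have h' : PySem.List.sorted g posKey false = PySem.List.sorted g' posKey false := h
  have hperm : g.Perm g' := h1.symm.trans (by rw [h']; exact h2)
  exact hperm.mem_iff

theorem uniq_group {G : List (PySem.Set (Int × Int × Int))} (hfl : G.flatten.Nodup)
    {g h : PySem.Set (Int × Int × Int)} (hg : g ∈ G) (hh : h ∈ G)
    {b : Int × Int × Int} (hbg : b ∈ g) (hbh : b ∈ h) : g = h := by
  induction G with
  | nil => cases hg
  | cons a t ih =>
    simp only [List.flatten_cons, List.nodup_append] at hfl
    obtain ⟨ha, ht, hdisj⟩ := hfl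
    rcases List.mem_cons.mp hg with rfl | hg' <;> rcases List.mem_cons.mp hh with rfl | hh'
    · rfl
    · exact (hdisj b hbg b (List.mem_flatten.mpr ⟨h, hh', hbh⟩) rfl).elim
    · exact (hdisj b hbh b (List.mem_flatten.mpr ⟨g, hg', hbg⟩) rfl).elim
    · exact ih ht hg' hh'

theorem nodup_of_mem_groups {G : List (PySem.Set (Int × Int × Int))} (hfl : G.flatten.Nodup)
    {g : PySem.Set (Int × Int × Int)} (hg : g ∈ G) : g.Nodup :=
  hfl.sublist (List.sublist_flatten_of_mem hg)

theorem find?_grp {G : List (PySem.Set (Int × Int × Int))} (hfl : G.flatten.Nodup)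
    {g : PySem.Set (Int × Int × Int)} (hg : g ∈ G) {b : Int × Int × Int} (hb : b ∈ g) :
    G.find? (fun g' => PySem.Set.contains g' b) = some g := by
  induction G with
  | nil => cases hg
  | cons a t ih =>
    simp only [List.flatten_cons, List.nodup_append] at hfl
    obtain ⟨ha, ht, hdisj⟩ := hfl
    by_cases hc : b ∈ a
    · have hga : g = a := by
        rcases List.mem_cons.mp hg with rfl | hg'
        · rfl
        · exact (hdisj b hc b (List.mem_flatten.mpr ⟨g, hg', hb⟩) rfl).elim
      rw [List.find?_cons_of_pos (by simpa [PySem.Set.contains_iff] using hc), hga]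
    · have hg' : g ∈ t := by
        rcases List.mem_cons.mp hg with rfl | hg'
        · exact absurd hb hc
        · exact hg'
      rw [List.find?_cons_of_neg (by simpa [PySem.Set.contains_iff] using hc)]
      exact ih ht hg'

theorem grpOf_eq {G : List (PySem.Set (Int × Int × Int))} (hfl : G.flatten.Nodup)
    {g : PySem.Set (Int × Int × Int)} (hg : g ∈ G) {b : Int × Int × Int} (hb : b ∈ g) :
    grpOf G b = g := by
  unfold grpOf
  rw [find?_grp hfl hg hb]
  rfl

-- A's inner 'for b in merged: connections[b] = merged' loop, as a getD table
theorem dict_fold_insert_const_getD (ms : List (Int × Int × Int))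
    (d : PySem.Dict (Int × Int × Int) (PySem.Set (Int × Int × Int)))
    (v : PySem.Set (Int × Int × Int)) (c : Int × Int × Int) :
    ((ms.foldl (fun d' b => d'.insert b v) d).getD c PySem.Set.empty)
      = if c ∈ ms then v else d.getD c PySem.Set.empty := by
  induction ms generalizing d with
  | nil => simp
  | cons m t ih =>
    simp only [List.foldl_cons, ih, PySem.Dict.getD_insert, List.mem_cons]
    by_cases h1 : c ∈ t <;> by_cases h2 : c = m <;> simp [h1, h2]

theorem set_update_of_subset {s : PySem.Set (Int × Int × Int)} {xs : List (Int × Int × Int)}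
    (h : ∀ x ∈ xs, x ∈ s) : PySem.Set.update s xs = s := by
  rw [PySem.Set.update_eq_append_filter]
  have hnil : (PySem.Set.ofList xs).filter (fun y => !PySem.Set.contains s y) = [] := by
    apply List.filter_eq_nil_iff.mpr
    intro y hy
    simp [h y ((PySem.Set.mem_ofList _ _).mp hy)]
  rw [hnil, List.append_nil]

theorem init_getD (boxes : List (Int × Int × Int))
    (d : PySem.Dict (Int × Int × Int) (PySem.Set (Int × Int × Int))) (c : Int × Int × Int) :
    ((boxes.foldl (fun d' b => d'.insert b ([b] : PySem.Set (Int × Int × Int))) d).getD c PySem.Set.empty)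
      = if c ∈ boxes then [c] else d.getD c PySem.Set.empty := by
  induction boxes generalizing d with
  | nil => simp
  | cons m t ih =>
    simp only [List.foldl_cons, ih, PySem.Dict.getD_insert, List.mem_cons]
    by_cases h1 : c ∈ t <;> by_cases h2 : c = m <;> simp [h1, h2]

theorem flatten_map_singleton (l : List (Int × Int × Int)) :
    (l.map (fun b => ([b] : PySem.Set (Int × Int × Int)))).flatten = l := by
  induction l with
  | nil => rfl
  | cons x xs ih => simp [ih]

theorem inv_init (boxes : List (Int × Int × Int)) :
    CInv (PySem.List.dedup boxes)
      (boxes.foldl (fun d b => d.insert b [b]) PySem.Dict.empty)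
      ((PySem.List.dedup boxes).map (fun b => [b])) := by
  refine ⟨?_, ?_, ?_, ?_, ?_⟩
  · rw [PySem.Dict.keys_foldl_insert boxes (fun _ b => [b]) PySem.Dict.empty,
      PySem.Dict.keys_empty, PySem.Set.update_nil_left, PySem.List.dedup_eq_ofList]
  · intro g hg
    obtain ⟨b, _, rfl⟩ := List.mem_map.mp hg
    simp
  · rw [flatten_map_singleton]
    exact PySem.List.nodup_dedup boxes
  · intro b; rw [flatten_map_singleton]
  · intro g hg b hb
    obtain ⟨b', hb', rfl⟩ := List.mem_map.mp hg
    have hbb : b = b' := by simpa using hb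
    subst hbb
    rw [init_getD, if_pos ((PySem.List.mem_dedup boxes b).mp hb')]
    exact ⟨List.nodup_singleton b, fun x => Iff.rfl⟩

theorem inv_step (B0 : List (Int × Int × Int))
    (d : PySem.Dict (Int × Int × Int) (PySem.Set (Int × Int × Int)))
    (G : List (PySem.Set (Int × Int × Int)))
    (hinv : CInv B0 d G) (e : Int × (Int × Int × Int) × (Int × Int × Int))
    (hb1 : e.2.1 ∈ B0) (hb2 : e.2.2 ∈ B0) :
    CInv B0
      (let merged := PySem.Set.union (d.getD e.2.1 PySem.Set.empty) (d.getD e.2.2 PySem.Set.empty)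
       merged.foldl (fun d' b => d'.insert b merged) d)
      ((G.filter (fun g => !PySem.Set.contains g e.2.1 && !PySem.Set.contains g e.2.2))
        ++ [PySem.Set.union ((G.find? (fun g => PySem.Set.contains g e.2.1)).getD PySem.Set.empty)
              ((G.find? (fun g => PySem.Set.contains g e.2.2)).getD PySem.Set.empty)]) := by
  obtain ⟨hk, hne, hfl, hcov, hcup⟩ := hinv
  obtain ⟨ga, hga, hia⟩ : ∃ g ∈ G, e.2.1 ∈ g := List.mem_flatten.mp ((hcov e.2.1).mpr hb1)
  obtain ⟨gb, hgb, hib⟩ : ∃ g ∈ G, e.2.2 ∈ g := List.mem_flatten.mp ((hcov e.2.2).mpr hb2)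
  have e1 : (G.find? (fun g => PySem.Set.contains g e.2.1)).getD PySem.Set.empty = ga := by
    rw [find?_grp hfl hga hia]; rfl
  have e2 : (G.find? (fun g => PySem.Set.contains g e.2.2)).getD PySem.Set.empty = gb := by
    rw [find?_grp hfl hgb hib]; rfl
  rw [e1, e2]
  obtain ⟨hnd1, hm1⟩ := hcup ga hga e.2.1 hia
  obtain ⟨hnd2, hm2⟩ := hcup gb hgb e.2.2 hib
  set merged := PySem.Set.union (d.getD e.2.1 PySem.Set.empty) (d.getD e.2.2 PySem.Set.empty) with hmdef
  have hmem : ∀ x, x ∈ merged ↔ x ∈ ga ∨ x ∈ gb := by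
    intro x
    rw [hmdef, PySem.Set.mem_union, hm1 x, hm2 x]
  have hmnd : merged.Nodup := PySem.Set.nodup_union _ _ hnd1
  have hsubB0 : ∀ x ∈ merged, x ∈ B0 := by
    intro x hx
    rcases (hmem x).mp hx with h | h
    · exact (hcov x).mp (List.mem_flatten.mpr ⟨ga, hga, h⟩)
    · exact (hcov x).mp (List.mem_flatten.mpr ⟨gb, hgb, h⟩)
  have hget : ∀ c, ((merged.foldl (fun d' b => d'.insert b merged) d).getD c PySem.Set.empty)
      = if c ∈ merged then merged else d.getD c PySem.Set.empty :=
    dict_fold_insert_const_getD merged d merged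
  have hfilt : ∀ g, (g ∈ G.filter (fun g => !PySem.Set.contains g e.2.1 && !PySem.Set.contains g e.2.2)
      ↔ g ∈ G ∧ e.2.1 ∉ g ∧ e.2.2 ∉ g) := by
    intro g
    rw [List.mem_filter]
    simp
  have hu : ∀ x, x ∈ PySem.Set.union ga gb ↔ x ∈ ga ∨ x ∈ gb := fun x => PySem.Set.mem_union ga gb x
  refine ⟨?_, ?_, ?_, ?_, ?_⟩
  · rw [PySem.Dict.keys_foldl_insert merged (fun _ _ => merged) d, hk, set_update_of_subset hsubB0]
  · intro g hg'
    rcases List.mem_append.mp hg' with hg' | hg'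
    · exact hne g ((hfilt g).mp hg').1
    · have hge : g = PySem.Set.union ga gb := by simpa using hg'
      subst hge
      exact List.ne_nil_of_mem ((hu e.2.1).mpr (Or.inl hia))
  · rw [List.flatten_append]
    simp only [List.flatten_cons, List.flatten_nil, List.append_nil]
    rw [List.nodup_append]
    refine ⟨hfl.sublist (List.Sublist.flatten List.filter_sublist),
      PySem.Set.nodup_union _ _ (nodup_of_mem_groups hfl hga), ?_⟩
    intro a ha b hb
    obtain ⟨g, hgf, hag⟩ := List.mem_flatten.mp ha
    obtain ⟨hgG, hn1, hn2⟩ := (hfilt g).mp hgf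
    rintro rfl
    rcases (hu a).mp hb with h | h
    · exact hn1 (by rw [uniq_group hfl hgG hga hag h]; exact hia)
    · exact hn2 (by rw [uniq_group hfl hgG hgb hag h]; exact hib)
  · intro x
    rw [List.flatten_append]
    simp only [List.flatten_cons, List.flatten_nil, List.append_nil, List.mem_append]
    constructor
    · rintro (hx | hx)
      · obtain ⟨g, hgf, hxg⟩ := List.mem_flatten.mp hx
        exact (hcov x).mp (List.mem_flatten.mpr ⟨g, ((hfilt g).mp hgf).1, hxg⟩)
      · rcases (hu x).mp hx with h | h
        · exact (hcov x).mp (List.mem_flatten.mpr ⟨ga, hga, h⟩)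
        · exact (hcov x).mp (List.mem_flatten.mpr ⟨gb, hgb, h⟩)
    · intro hx
      obtain ⟨g, hgG, hxg⟩ := List.mem_flatten.mp ((hcov x).mpr hx)
      by_cases h1 : e.2.1 ∈ g
      · exact Or.inr ((hu x).mpr (Or.inl (uniq_group hfl hgG hga h1 hia ▸ hxg)))
      · by_cases h2 : e.2.2 ∈ g
        · exact Or.inr ((hu x).mpr (Or.inr (uniq_group hfl hgG hgb h2 hib ▸ hxg)))
        · exact Or.inl (List.mem_flatten.mpr ⟨g, (hfilt g).mpr ⟨hgG, h1, h2⟩, hxg⟩)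
  · intro g hg' b hb
    rcases List.mem_append.mp hg' with hgf | hgu
    · obtain ⟨hgG, hn1, hn2⟩ := (hfilt g).mp hgf
      have hnb : b ∉ merged := by
        intro hbm
        rcases (hmem b).mp hbm with h | h
        · exact hn1 (by rw [uniq_group hfl hgG hga hb h]; exact hia)
        · exact hn2 (by rw [uniq_group hfl hgG hgb hb h]; exact hib)
      rw [hget b, if_neg hnb]
      exact hcup g hgG b hb
    · have hge : g = PySem.Set.union ga gb := by simpa using hgu
      subst hge
      have hbm : b ∈ merged := (hmem b).mpr ((hu b).mp hb)
      rw [hget b, if_pos hbm]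
      exact ⟨hmnd, fun x => (hmem x).trans ((hu x).symm)⟩

theorem inv_fold (B0 : List (Int × Int × Int))
    (edges : List (Int × (Int × Int × Int) × (Int × Int × Int)))
    (he : ∀ e ∈ edges, e.2.1 ∈ B0 ∧ e.2.2 ∈ B0)
    (d : PySem.Dict (Int × Int × Int) (PySem.Set (Int × Int × Int)))
    (G : List (PySem.Set (Int × Int × Int))) (hinv : CInv B0 d G) :
    CInv B0
      (edges.foldl (fun d e =>
        let merged := PySem.Set.union (d.getD e.2.1 PySem.Set.empty) (d.getD e.2.2 PySem.Set.empty)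
        merged.foldl (fun d' b => d'.insert b merged) d) d)
      (edges.foldl (fun G e =>
        let g1 := (G.find? (fun g => PySem.Set.contains g e.2.1)).getD PySem.Set.empty
        let g2 := (G.find? (fun g => PySem.Set.contains g e.2.2)).getD PySem.Set.empty
        (G.filter (fun g => !PySem.Set.contains g e.2.1 && !PySem.Set.contains g e.2.2))
          ++ [PySem.Set.union g1 g2]) G) := by
  induction edges generalizing d G with
  | nil => exact hinv
  | cons e es ih =>
      exact ih (fun e' he' => he e' (List.mem_cons_of_mem _ he'))
        _ _ (inv_step B0 d G hinv e (he e (List.mem_cons_self)).1 (he e (List.mem_cons_self)).2)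

theorem pairs_mem (boxes : List (Int × Int × Int))
    (pq : (Int × Int × Int) × (Int × Int × Int)) (h : pq ∈ pairsOf boxes) :
    pq.1 ∈ boxes ∧ pq.2 ∈ boxes := by
  obtain ⟨c, hc, hm⟩ := List.mem_filterMap.mp h
  match c, hm with
  | [p, q], hm =>
    have hpq : pq = (p, q) := by simpa using hm.symm
    obtain ⟨hsub, -⟩ := (PySem.List.mem_combinations_iff boxes 2 [p, q]).mp hc
    subst hpq
    exact ⟨hsub.mem (by simp), hsub.mem (by simp)⟩

theorem edges_mem (boxes : List (Int × Int × Int)) (mc : Int)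
    (e : Int × (Int × Int × Int) × (Int × Int × Int)) (he : e ∈ sortPairs boxes mc) :
    e.2.1 ∈ PySem.List.dedup boxes ∧ e.2.2 ∈ PySem.List.dedup boxes := by
  have h1 : e ∈ PySem.List.sorted ((pairsOf boxes).map (fun pq => (distanceA pq.1 pq.2, pq))) edgeKey false :=
    List.mem_of_mem_take he
  have h2 := (PySem.List.mem_sorted _ _ _ _).mp h1
  obtain ⟨pq, hpq, hE⟩ := List.mem_map.mp h2
  have := pairs_mem boxes pq hpq
  have h3 : e.2 = pq := by rw [← hE]
  rw [h3]
  exact ⟨(PySem.List.mem_dedup _ _).mpr this.1, (PySem.List.mem_dedup _ _).mpr this.2⟩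

-- the dedup of A's per-key circuit list equals B's first-occurrence scan
theorem scan_eq (B0 : List (Int × Int × Int)) (G : List (PySem.Set (Int × Int × Int)))
    (hfl : G.flatten.Nodup) (hcov : ∀ b : Int × Int × Int, b ∈ G.flatten ↔ b ∈ B0)
    (l : List (Int × Int × Int)) (hl : ∀ b ∈ l, b ∈ B0)
    (cs : PySem.Set (List (Int × Int × Int))) (seen : PySem.Set (Int × Int × Int))
    (hcs : ∀ b ∈ B0, (b ∈ seen ↔ SKey (grpOf G b) ∈ cs)) :
    l.foldl (fun s b => PySem.Set.add s (SKey (grpOf G b))) cs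
      = (l.foldl (fun (st : List (List (Int × Int × Int)) × PySem.Set (Int × Int × Int)) b =>
          if PySem.Set.contains st.2 b then st
          else
            (st.1 ++ [PySem.List.sorted ((G.find? (fun g => PySem.Set.contains g b)).getD PySem.Set.empty) posKey false],
             PySem.Set.union st.2 ((G.find? (fun g => PySem.Set.contains g b)).getD PySem.Set.empty)))
          (cs, seen)).1 := by
  have hgrp : ∀ c ∈ B0, grpOf G c ∈ G ∧ c ∈ grpOf G c := by
    intro c hc
    obtain ⟨g, hgG, hcg⟩ := List.mem_flatten.mp ((hcov c).mpr hc)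
    rw [grpOf_eq hfl hgG hcg]
    exact ⟨hgG, hcg⟩
  induction l generalizing cs seen with
  | nil => rfl
  | cons b t ih =>
    have hbB0 : b ∈ B0 := hl b List.mem_cons_self
    have hkey : ∀ b' ∈ B0, (b' ∈ grpOf G b ↔ SKey (grpOf G b') = SKey (grpOf G b)) := by
      intro b' hb'
      constructor
      · intro h
        rw [uniq_group hfl (hgrp b' hb').1 (hgrp b hbB0).1 (hgrp b' hb').2 h]
      · intro h
        exact (mem_of_SKey_eq h b').mp (hgrp b' hb').2
    have e0 : (G.find? (fun g => PySem.Set.contains g b)).getD PySem.Set.empty = grpOf G b := rfl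
    have eS : PySem.List.sorted (grpOf G b) posKey false = SKey (grpOf G b) := rfl
    simp only [List.foldl_cons, e0, eS]
    by_cases hs : b ∈ seen
    · rw [if_pos (by rwa [PySem.Set.contains_iff]), PySem.Set.add_of_mem ((hcs b hbB0).mp hs)]
      exact ih (fun b' hb' => hl b' (List.mem_cons_of_mem _ hb')) cs seen hcs
    · rw [if_neg (by simp [hs]),
        PySem.Set.add_of_not_mem (fun hmem => hs ((hcs b hbB0).mpr hmem))]
      exact ih (fun b' hb' => hl b' (List.mem_cons_of_mem _ hb'))
        (cs ++ [SKey (grpOf G b)]) (PySem.Set.union seen (grpOf G b))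
        (fun b' hb' => by
          rw [PySem.Set.mem_union, List.mem_append, List.mem_singleton]
          exact or_congr (hcs b' hb') (hkey b' hb'))

theorem final_eq (B0 : List (Int × Int × Int))
    (d : PySem.Dict (Int × Int × Int) (PySem.Set (Int × Int × Int)))
    (G : List (PySem.Set (Int × Int × Int))) (hB0 : B0.Nodup) (hinv : CInv B0 d G) :
    d.items.foldl (fun u kv => PySem.Set.add u (PySem.List.sorted kv.2 posKey false)) PySem.Set.empty
      = (B0.foldl (fun (st : List (List (Int × Int × Int)) × PySem.Set (Int × Int × Int)) b =>
          if PySem.Set.contains st.2 b then st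
          else
            (st.1 ++ [PySem.List.sorted ((G.find? (fun g => PySem.Set.contains g b)).getD PySem.Set.empty) posKey false],
             PySem.Set.union st.2 ((G.find? (fun g => PySem.Set.contains g b)).getD PySem.Set.empty)))
          ([], PySem.Set.empty)).1 := by
  obtain ⟨hk, hne, hfl, hcov, hcup⟩ := hinv
  have hknd : d.keys.Nodup := by rw [hk]; exact hB0
  have hitems := PySem.Dict.items_eq_map_keys d hknd PySem.Set.empty
  rw [hitems, hk, ← PySem.Set.update_map_eq_foldl_add, PySem.Set.update_empty, List.map_map]
  have hmapeq : B0.map ((fun kv : (Int × Int × Int) × PySem.Set (Int × Int × Int) =>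
        PySem.List.sorted kv.2 posKey false) ∘ (fun k => (k, d.getD k PySem.Set.empty)))
      = B0.map (fun b => SKey (grpOf G b)) := by
    apply List.map_congr_left
    intro b hb
    obtain ⟨g, hgG, hbg⟩ := List.mem_flatten.mp ((hcov b).mpr hb)
    obtain ⟨hnd, hm⟩ := hcup g hgG b hbg
    have hperm : (d.getD b PySem.Set.empty).Perm g :=
      (List.perm_ext_iff_of_nodup hnd (nodup_of_mem_groups hfl hgG)).mpr hm
    show PySem.List.sorted (d.getD b PySem.Set.empty) posKey false = SKey (grpOf G b)
    rw [grpOf_eq hfl hgG hbg]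
    exact SKey_congr hperm
  rw [hmapeq, PySem.Set.ofList_eq_foldl, List.foldl_map]
  exact scan_eq B0 G hfl hcov B0 (fun b hb => hb) [] PySem.Set.empty
    (fun b hb => by simp [PySem.Set.empty])

-- ===== VERDICT (by name: the statement is the Claim_ definition above) =====
theorem solve_spec : Claim_equal_solve := by
  intro boxes mc _ _
  show solve boxes mc = solve_alt boxes mc
  unfold solve solve_alt
  have hinv := inv_fold (PySem.List.dedup boxes) (sortPairs boxes mc)
    (fun e he => edges_mem boxes mc e he) _ _ (inv_init boxes)
  have h := final_eq (PySem.List.dedup boxes) _ _ (PySem.List.nodup_dedup boxes) hinv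
  simp only [sortPairs] at h ⊢
  rw [h]
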